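-- pv_equiv track=rewrite | github.com/gabriellaec/desoft-analise-exercicios | backup/user_211/ch55_2020_04_11_22_05_26_485936.py | encontra_maximo
-- ===== SOURCE A (Python) =====
-- def encontra_maximo(matriz):
--     lista=[]
--     lista2=[]
--     for i in range(0,3):
--         for j in range(0,3):
--             lista.append(matriz[i][j])
--     for i in range(0,len(lista)):
--         lista2.append(abs(lista[i]))
--
--     return max(lista2)
-- ===== SOURCE B (Python) =====
-- def encontra_maximo(matriz):
--     maximo = abs(matriz[0][0])
--     for i in range(3):
--         for j in range(3):
--             v = abs(matriz[i][j])
--             if v > maximo: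
--                 maximo = v
--     return maximo
-- ===== Notes on version B (the rewrite author's own statement) =====
-- stated objective: simpler
-- what changed: Replaces A's three passes (build a 9-element list, map abs into a second list, reduce with max) by a single nested loop that keeps a running maximum seeded with abs(matriz[0][0]); no intermediate lists.
import Mathlib
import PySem

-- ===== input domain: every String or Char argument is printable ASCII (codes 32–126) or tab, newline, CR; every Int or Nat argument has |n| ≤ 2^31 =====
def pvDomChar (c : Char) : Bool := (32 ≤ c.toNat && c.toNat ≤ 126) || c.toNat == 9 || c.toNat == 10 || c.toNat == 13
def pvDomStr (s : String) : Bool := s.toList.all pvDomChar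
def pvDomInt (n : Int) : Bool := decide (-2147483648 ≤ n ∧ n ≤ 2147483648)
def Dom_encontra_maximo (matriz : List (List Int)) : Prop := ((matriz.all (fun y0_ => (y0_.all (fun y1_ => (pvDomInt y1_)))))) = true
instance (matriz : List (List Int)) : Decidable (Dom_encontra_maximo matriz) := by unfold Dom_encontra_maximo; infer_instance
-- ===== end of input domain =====

-- B replaces A's build-then-map-then-max (two temporary lists) by one nested loop with a running maximum: simpler, no lists.

-- ===== PORT A =====
def encontra_maximo (matriz : List (List Int)) : Int :=
  let lista : List Int :=
    (PySem.List.pyRange 0 3 1).foldl (fun acc i =>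
      (PySem.List.pyRange 0 3 1).foldl (fun acc2 j =>
        acc2 ++ [PySem.List.pyGetD (PySem.List.pyGetD matriz i []) j 0]) acc) []
  let lista2 : List Int :=
    (PySem.List.pyRange 0 (lista.length : Int) 1).foldl (fun acc i =>
      acc ++ [|PySem.List.pyGetD lista i 0|]) []
  (PySem.List.max? lista2 (fun x => x)).getD 0

-- ===== PORT B =====
def encontra_maximo_alt (matriz : List (List Int)) : Int :=
  let maximo : Int := |PySem.List.pyGetD (PySem.List.pyGetD matriz 0 []) 0 0|
  (PySem.List.pyRange 0 3 1).foldl (fun acc i =>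
    (PySem.List.pyRange 0 3 1).foldl (fun acc2 j =>
      let v := |PySem.List.pyGetD (PySem.List.pyGetD matriz i []) j 0|
      if v > acc2 then v else acc2) acc) maximo

-- ===== PRECONDITION & SPEC =====
-- A indexes matriz[i][j] for i,j in 0..2: it raises IndexError unless there are at least
-- 3 rows and each of the first 3 rows has at least 3 entries.
def Pre_encontra_maximo (matriz : List (List Int)) : Prop :=
  3 ≤ matriz.length ∧ ∀ r ∈ matriz.take 3, 3 ≤ r.length
instance (matriz : List (List Int)) : Decidable (Pre_encontra_maximo matriz) := by
  unfold Pre_encontra_maximo; infer_instance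
def pvWitness_encontra_maximo : List (List Int) := [[1, -5, 3], [4, 2, -9], [0, 7, 6]]

def Spec_encontra_maximo (matriz : List (List Int)) (out : Int) : Prop := out = encontra_maximo_alt matriz
instance (matriz : List (List Int)) (out : Int) : Decidable (Spec_encontra_maximo matriz out) := by unfold Spec_encontra_maximo; infer_instance

-- ===== CLAIM (what is proved, stated in full; the proofs are below) =====
def Claim_equal_encontra_maximo : Prop := ∀ (matriz : List (List Int)), Dom_encontra_maximo matriz → Pre_encontra_maximo matriz → Spec_encontra_maximo matriz (encontra_maximo matriz)

-- ===== LEMMAS AND PROOFS =====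
theorem pv_ite_max (a v : Int) : (if v > a then v else a) = max a v := by
  split <;> omega

theorem pv_main (matriz : List (List Int)) (h : Pre_encontra_maximo matriz) :
    encontra_maximo matriz = encontra_maximo_alt matriz := by
  obtain ⟨hlen, hrows⟩ := h
  match matriz, hlen with
  | r0 :: r1 :: r2 :: rest, _ =>
    have h0 : 3 ≤ r0.length := hrows r0 (by simp)
    have h1 : 3 ≤ r1.length := hrows r1 (by simp)
    have h2 : 3 ≤ r2.length := hrows r2 (by simp)
    match r0, h0 with
    | a0 :: a1 :: a2 :: t0, _ =>
      match r1, h1 with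
      | b0 :: b1 :: b2 :: t1, _ =>
        match r2, h2 with
        | c0 :: c1 :: c2 :: t2, _ =>
          simp [encontra_maximo, encontra_maximo_alt,
            show PySem.List.pyRange 0 3 1 = [0, 1, 2] from by decide,
            show PySem.List.pyRange 0 9 1 = [0, 1, 2, 3, 4, 5, 6, 7, 8] from by decide,
            PySem.List.pyGetD_ofNat',
            PySem.List.max?_id_cons, pv_ite_max, List.foldl, max_assoc]

-- ===== VERDICT (by name: the statement is the Claim_ definition above) =====
theorem encontra_maximo_spec : Claim_equal_encontra_maximo := by
  intro m _ hpre
  unfold Spec_encontra_maximo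
  exact pv_main m hpre
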